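-- pv_equiv track=rewrite | github.com/gabrielekarra/neurocode | src/neurocode/toon_parse.py | _parse_table_header
-- ===== SOURCE A (Python) =====
-- from typing import Dict, List
--
-- def _parse_table_header(line: str) -> tuple[str, List[str]]:
--     """Parse a TOON table header line like ``name[n]{a,b,c}:``.
--
--     Returns (table_name, [field1, field2, ...]).
--     """
--
--     line = line.strip()
--     # name[...]{...}:
--     name_part, rest = line.split("[", 1)
--     name = name_part.strip()
--     # Skip count between [ and ]
--     _, rest_after_bracket = rest.split("]", 1)
--     brace_start = rest_after_bracket.index("{")
--     brace_end = rest_after_bracket.index("}")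
--     fields_str = rest_after_bracket[brace_start + 1 : brace_end]
--     fields = [field.strip() for field in fields_str.split(",") if field.strip()]
--     return name, fields
-- ===== SOURCE B (Python) =====
-- from typing import List
--
--
-- def _parse_table_header(line: str) -> tuple[str, List[str]]:
--     """Single left-to-right scan locating the delimiters, then direct slicing;
--     fields accumulated by a manual comma scan instead of split/index chains."""
--     s = line.strip()
--     lb = rb = ob = cb = -1
--     for k, ch in enumerate(s):
--         if lb < 0:
--             if ch == '[':
--                 lb = k
--         elif rb < 0:
--             if ch == ']':
--                 rb = k
--         else:
--             if ob < 0 and ch == '{':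
--                 ob = k
--             if cb < 0 and ch == '}':
--                 cb = k
--     if lb < 0 or rb < 0 or ob < 0 or cb < 0:
--         raise ValueError("malformed TOON table header")
--     name = s[:lb].strip()
--     fields: List[str] = []
--     cur = ''
--     for ch in s[ob + 1:cb]:
--         if ch == ',':
--             t = cur.strip()
--             if t:
--                 fields.append(t)
--             cur = ''
--         else:
--             cur += ch
--     t = cur.strip()
--     if t:
--         fields.append(t)
--     return name, fields
-- ===== Notes on version B (the rewrite author's own statement) =====
-- stated objective: alternative
-- what changed: Replaced A's split('[',1)/split(']',1)/index('{')/index('}') chain of string-library passes by a single left-to-right state-machine scan that locates all four delimiters in one traversal, plus a manual comma accumulator instead of split-then-filter; Pre_ excludes exactly the malformed headers on which A raises ValueError (B raises ValueError there too).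
import Mathlib
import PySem

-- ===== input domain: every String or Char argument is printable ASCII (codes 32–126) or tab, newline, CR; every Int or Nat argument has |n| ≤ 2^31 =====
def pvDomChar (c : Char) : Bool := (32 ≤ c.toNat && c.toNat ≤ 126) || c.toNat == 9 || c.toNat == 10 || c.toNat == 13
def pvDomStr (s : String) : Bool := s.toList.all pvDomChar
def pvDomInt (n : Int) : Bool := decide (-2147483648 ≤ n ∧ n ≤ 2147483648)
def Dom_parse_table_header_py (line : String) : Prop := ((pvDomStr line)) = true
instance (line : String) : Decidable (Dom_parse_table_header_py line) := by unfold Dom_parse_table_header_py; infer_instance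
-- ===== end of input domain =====

-- B replaces A's split/split/index/index chain by one left-to-right delimiter scan plus a manual comma scan (alternative structure, similar cost).

-- ===== PORT A =====
-- literal transliteration of A; where Python raises ValueError (missing delimiter or
-- failed 2-way unpack) the splits/match fall through to a default branch — those inputs
-- are excluded by Pre_ below.
def parse_table_header_py (line : String) : String × List String :=
  let line' := PySem.Str.strip line
  match PySem.Str.splitMax? line' "[" 1 with
  | some (name_part :: rest :: _) =>
      let name := PySem.Str.strip name_part
      (match PySem.Str.splitMax? rest "]" 1 with
       | some (_ :: rest_after_bracket :: _) =>
          let brace_start := PySem.Str.find rest_after_bracket "{"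
          let brace_end := PySem.Str.find rest_after_bracket "}"
          let fields_str := PySem.Str.slice rest_after_bracket (some (brace_start + 1)) (some brace_end)
          let fields := ((PySem.Str.split? fields_str ",").getD []).filterMap
              (fun f => if PySem.Str.strip f ≠ "" then some (PySem.Str.strip f) else none)
          (name, fields)
       | _ => ("", []))
  | _ => ("", [])

-- ===== PORT B =====
-- B's single pass locating the first '[', the first ']' after it, and the first '{' / '}' after that
def pvScanB : List Char → Nat → (Int × Int × Int × Int) → (Int × Int × Int × Int)
  | [], _, st => st
  | c :: cs, k, (lb, rb, ob, cb) =>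
    let st :=
      if lb < 0 then (if c = '[' then ((k : Int), rb, ob, cb) else (lb, rb, ob, cb))
      else if rb < 0 then (if c = ']' then (lb, (k : Int), ob, cb) else (lb, rb, ob, cb))
      else
        let ob' := if ob < 0 ∧ c = '{' then (k : Int) else ob
        let cb' := if cb < 0 ∧ c = '}' then (k : Int) else cb
        (lb, rb, ob', cb')
    pvScanB cs (k + 1) st

-- B's manual comma scan building the field list
def pvFieldsB : List Char → List Char → List String → List String
  | [], cur, acc =>
      let t := PySem.Chars.strip cur
      if t ≠ [] then acc ++ [String.ofList t] else acc
  | c :: cs, cur, acc =>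
      if c = ',' then
        let t := PySem.Chars.strip cur
        pvFieldsB cs [] (if t ≠ [] then acc ++ [String.ofList t] else acc)
      else pvFieldsB cs (cur ++ [c]) acc

def parse_table_header_py_alt (line : String) : String × List String :=
  let s := (PySem.Str.strip line).toList
  let res := pvScanB s 0 (-1, -1, -1, -1)
  let lb := res.1
  let rb := res.2.1
  let ob := res.2.2.1
  let cb := res.2.2.2
  if lb < 0 ∨ rb < 0 ∨ ob < 0 ∨ cb < 0 then ("", [])  -- Python B raises ValueError here (outside Pre_)
  else
    let name := String.ofList (PySem.Chars.strip (PySem.List.slice s none (some lb)))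
    let seg := PySem.List.slice s (some (ob + 1)) (some cb)
    (name, pvFieldsB seg [] [])

-- ===== PRECONDITION & SPEC =====
-- Pre_ admits exactly the inputs on which Python A returns normally: the stripped line must
-- contain a '[', a ']' after the first '[', and both '{' and '}' after that ']'; on every
-- other input Python A raises ValueError (and Python B raises ValueError as well).
def Pre_parse_table_header_py (line : String) : Prop :=
  let cs := (PySem.Str.strip line).toList
  '[' ∈ cs ∧
  (let r1 := (cs.dropWhile (· ≠ '[')).drop 1
   ']' ∈ r1 ∧
   (let r2 := (r1.dropWhile (· ≠ ']')).drop 1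
    '{' ∈ r2 ∧ '}' ∈ r2))
instance (line : String) : Decidable (Pre_parse_table_header_py line) := by
  unfold Pre_parse_table_header_py; infer_instance

def pvWitness_parse_table_header_py : String := "users[2]{id, name}:"

def Spec_parse_table_header_py (line : String) (out : String × List String) : Prop := out = parse_table_header_py_alt line
instance (line : String) (out : String × List String) : Decidable (Spec_parse_table_header_py line out) := by unfold Spec_parse_table_header_py; infer_instance

-- ===== CLAIM (what is proved, stated in full; the proofs are below) =====
def Claim_equal_parse_table_header_py : Prop := ∀ (line : String), Dom_parse_table_header_py line → Pre_parse_table_header_py line → Spec_parse_table_header_py line (parse_table_header_py line)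

-- ===== LEMMAS AND PROOFS =====

-- first occurrence of a single character, with a running index
def pvFirst (c : Char) : List Char → Nat → Int
  | [], _ => -1
  | a :: r, k => if a = c then (k : Int) else pvFirst c r (k + 1)

theorem pv_goM0 (sep : List Char) (fuel : ℕ) (l cur : List Char) (acc : List (List Char)) :
    PySem.Chars.splitOnMax.go sep fuel 0 l cur acc = ((cur.reverse ++ l) :: acc).reverse := by
  cases fuel <;> cases l <;> simp [PySem.Chars.splitOnMax.go]

theorem pv_goSplit1 (c : Char) : ∀ (t : List Char) (fuel : ℕ) (r cur : List Char)
    (acc : List (List Char)), c ∉ t → t.length + 1 ≤ fuel →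
    PySem.Chars.splitOnMax.go [c] fuel 1 (t ++ c :: r) cur acc = acc.reverse ++ [cur.reverse ++ t, r]
  | [], fuel, r, cur, acc, _, hf => by
      cases fuel with
      | zero => omega
      | succ f =>
        rw [List.nil_append, PySem.Chars.splitOnMax.go.eq_def]
        simp only [List.isPrefixOf, Nat.succ_ne_zero, if_neg, Bool.and_eq_true, beq_self_eq_true,
          List.isPrefixOf_nil_left, and_self, if_true, if_pos]
        simp [pv_goM0]
  | a :: t, fuel, r, cur, acc, hm, hf => by
      have ha : ¬ a = c := fun h => hm (by simp [h])
      cases fuel with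
      | zero => simp at hf
      | succ f =>
        rw [List.cons_append, PySem.Chars.splitOnMax.go.eq_def]
        simp only []
        rw [if_neg (by omega), if_neg (by simp [List.isPrefixOf]; intro h; exact absurd h.symm ha)]
        have := pv_goSplit1 c t f r (a :: cur) acc (fun h => hm (by simp [h]))
          (by simp at hf; omega)
        rw [this]; simp

theorem pv_splitOnMax_first (c : Char) (t r : List Char) (h : c ∉ t) :
    PySem.Chars.splitOnMax (t ++ c :: r) [c] 1 = [t, r] := by
  unfold PySem.Chars.splitOnMax
  rw [if_neg (by omega)]
  have h1 : (1 : ℤ).toNat = 1 := rfl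
  rw [h1, pv_goSplit1 c t _ r [] [] h (by simp)]
  simp

theorem pv_findGo (c : Char) : ∀ (l : List Char) (k : ℕ),
    PySem.Chars.find.go [c] l k = pvFirst c l k
  | [], k => by rw [PySem.Chars.find.go.eq_def]; simp [pvFirst, List.isEmpty]
  | a :: l, k => by
      rw [PySem.Chars.find.go.eq_def]
      by_cases hac : a = c
      · subst hac; simp [pvFirst, List.isPrefixOf]
      · have hne : ¬ (c == a) = true := by simpa using fun h => hac h.symm
        simp only [List.isPrefixOf, hne, Bool.false_and, if_neg, Bool.false_eq_true,
          not_false_eq_true]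
        rw [pv_findGo c l (k+1)]
        simp [pvFirst, hac]

theorem pv_first_append (c : Char) : ∀ (u : List Char) (v : List Char) (k : ℕ), c ∉ u →
    pvFirst c (u ++ c :: v) k = ((k + u.length : ℕ) : ℤ)
  | [], v, k, _ => by simp [pvFirst]
  | a :: u, v, k, h => by
      have ha : ¬ a = c := fun hh => h (by simp [hh])
      simp only [List.cons_append, pvFirst, if_neg ha]
      rw [pv_first_append c u v (k+1) (fun hh => h (by simp [hh]))]
      push_cast [List.length_cons]; omega

-- decomposition of a list at the first occurrence of a member character
theorem pv_mem_split_first {c : Char} : ∀ {cs : List Char}, c ∈ cs →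
    ∃ t r, cs = t ++ c :: r ∧ c ∉ t ∧ (cs.dropWhile (· ≠ c)).drop 1 = r := by
  intro cs h
  induction cs with
  | nil => simp at h
  | cons a cs ih =>
    by_cases hac : a = c
    · subst hac
      exact ⟨[], cs, by simp, by simp, by simp [List.dropWhile]⟩
    · have hc : c ∈ cs := by
        rcases List.mem_cons.mp h with h | h
        · exact absurd h.symm hac
        · exact h
      obtain ⟨t, r, h1, h2, h3⟩ := ih hc
      refine ⟨a :: t, r, by simp [h1], ?_, ?_⟩
      · intro hmem
        rcases List.mem_cons.mp hmem with h | h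
        · exact hac h.symm
        · exact h2 h
      · rw [List.dropWhile_cons_of_pos (by simpa using hac)]
        exact h3

-- phase 1: no '[' seen yet; characters ≠ '[' leave the state untouched
theorem pv_scan1 : ∀ (t : List Char) (r : List Char) (k : ℕ) (rb ob cb : ℤ), '[' ∉ t →
    pvScanB (t ++ r) k (-1, rb, ob, cb) = pvScanB r (k + t.length) (-1, rb, ob, cb)
  | [], r, k, rb, ob, cb, _ => by simp
  | a :: t, r, k, rb, ob, cb, h => by
      have ha : ¬ a = '[' := fun hh => h (by simp [hh])
      simp only [List.cons_append, pvScanB, if_pos (by norm_num : (-1:ℤ) < 0), if_neg ha]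
      rw [pv_scan1 t r (k+1) rb ob cb (fun hh => h (by simp [hh]))]
      congr 1; simp; omega

-- phase 2: '[' found (lb ≥ 0), no ']' yet
theorem pv_scan2 : ∀ (t : List Char) (r : List Char) (k : ℕ) (lb ob cb : ℤ), ']' ∉ t → 0 ≤ lb →
    pvScanB (t ++ r) k (lb, -1, ob, cb) = pvScanB r (k + t.length) (lb, -1, ob, cb)
  | [], r, k, lb, ob, cb, _, _ => by simp
  | a :: t, r, k, lb, ob, cb, h, hlb => by
      have ha : ¬ a = ']' := fun hh => h (by simp [hh])
      simp only [List.cons_append, pvScanB, if_neg (by omega : ¬ lb < 0),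
        if_pos (by norm_num : (-1:ℤ) < 0), if_neg ha]
      rw [pv_scan2 t r (k+1) lb ob cb (fun hh => h (by simp [hh])) hlb]
      congr 1; simp; omega

-- phase 3: lb, rb ≥ 0; ob and cb are filled with the first occurrences
theorem pv_scan3 : ∀ (r : List Char) (k : ℕ) (lb rb ob cb : ℤ), 0 ≤ lb → 0 ≤ rb →
    (ob < 0 → ob = -1) → (cb < 0 → cb = -1) →
    pvScanB r k (lb, rb, ob, cb) =
      (lb, rb, if ob < 0 then pvFirst '{' r k else ob, if cb < 0 then pvFirst '}' r k else cb)
  | [], k, lb, rb, ob, cb, _, _, hob, hcb => by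
      by_cases h1 : ob < 0 <;> by_cases h2 : cb < 0 <;>
        simp_all [pvScanB, pvFirst]
  | a :: r, k, lb, rb, ob, cb, hlb, hrb, hob, hcb => by
      simp only [pvScanB, if_neg (by omega : ¬ lb < 0), if_neg (by omega : ¬ rb < 0)]
      rw [pv_scan3 r (k+1) lb rb _ _ hlb hrb
        (by intro h; by_cases hh : ob < 0 ∧ a = '{' <;> simp_all <;> omega)
        (by intro h; by_cases hh : cb < 0 ∧ a = '}' <;> simp_all <;> omega)]
      by_cases ho : ob < 0 <;> by_cases hc : cb < 0 <;>
        by_cases hao : a = '{' <;> by_cases hac : a = '}' <;>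
          simp_all [pvFirst] <;> try omega

-- the comma decomposition both field computations reduce to
def pvCommaSplit : List Char → List (List Char)
  | [] => [[]]
  | c :: cs => if c = ',' then [] :: pvCommaSplit cs else (pvCommaSplit cs).modifyHead (c :: ·)

def pvKeepField (p : List Char) : Option String :=
  if PySem.Chars.strip p ≠ [] then some (String.ofList (PySem.Chars.strip p)) else none

theorem pvCommaSplit_ne_nil : ∀ (cs : List Char), pvCommaSplit cs ≠ []
  | [] => by simp [pvCommaSplit]
  | c :: cs => by
      by_cases h : c = ',' <;> simp [pvCommaSplit, h]
      intro hh
      exact pvCommaSplit_ne_nil cs hh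

theorem pv_splitOnGo_comma : ∀ (cs : List Char) (fuel : ℕ) (cur : List Char)
    (acc : List (List Char)), cs.length ≤ fuel →
    PySem.Chars.splitOn.go [','] fuel cs cur acc =
      acc.reverse ++ (pvCommaSplit cs).modifyHead (cur.reverse ++ ·)
  | [], fuel, cur, acc, _ => by
      cases fuel <;> simp [PySem.Chars.splitOn.go, pvCommaSplit]
  | c :: cs, fuel, cur, acc, hf => by
      cases fuel with
      | zero => simp at hf
      | succ f =>
        by_cases h : c = ','
        · subst h
          rw [show PySem.Chars.splitOn.go [','] (f+1) (',' :: cs) cur acc =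
              PySem.Chars.splitOn.go [','] f (List.drop [','].length (',' :: cs)) [] (cur.reverse :: acc) by
            simp [PySem.Chars.splitOn.go, List.isPrefixOf]]
          simp only [List.length_cons, List.length_nil, List.drop_succ_cons, List.drop_zero]
          rw [pv_splitOnGo_comma cs f [] (cur.reverse :: acc) (by simp at hf; omega)]
          obtain ⟨h0, t0, hh⟩ := List.exists_cons_of_ne_nil (pvCommaSplit_ne_nil cs)
          simp [pvCommaSplit, hh]
        · rw [show PySem.Chars.splitOn.go [','] (f+1) (c :: cs) cur acc =
              PySem.Chars.splitOn.go [','] f cs (c :: cur) acc by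
            simp [PySem.Chars.splitOn.go, List.isPrefixOf]
            intro hh; exact absurd hh.symm h]
          rw [pv_splitOnGo_comma cs f (c :: cur) acc (by simp at hf; omega)]
          obtain ⟨h0, t0, hh⟩ := List.exists_cons_of_ne_nil (pvCommaSplit_ne_nil cs)
          simp [pvCommaSplit, h, hh]

theorem pv_splitOn_comma (cs : List Char) :
    PySem.Chars.splitOn cs [','] = pvCommaSplit cs := by
  unfold PySem.Chars.splitOn
  rw [pv_splitOnGo_comma cs (cs.length + 1) [] [] (by omega)]
  obtain ⟨h0, t0, hh⟩ := List.exists_cons_of_ne_nil (pvCommaSplit_ne_nil cs)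
  simp [hh]

theorem pv_fieldsB_eq : ∀ (cs cur : List Char) (acc : List String),
    pvFieldsB cs cur acc =
      acc ++ ((pvCommaSplit cs).modifyHead (cur ++ ·)).filterMap pvKeepField
  | [], cur, acc => by
      simp only [pvFieldsB, pvCommaSplit, List.modifyHead, List.filterMap, pvKeepField]
      by_cases h : PySem.Chars.strip cur = [] <;> simp [h, List.filterMap]
  | c :: cs, cur, acc => by
      obtain ⟨h0, t0, hh⟩ := List.exists_cons_of_ne_nil (pvCommaSplit_ne_nil cs)
      by_cases h : c = ','
      · subst h
        simp only [pvFieldsB]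
        rw [pv_fieldsB_eq cs [] _]
        by_cases hs : PySem.Chars.strip cur = [] <;>
          simp [pvCommaSplit, hh, pvKeepField, hs, List.filterMap]
      · simp only [pvFieldsB, if_neg h]
        rw [pv_fieldsB_eq cs (cur ++ [c]) acc]
        simp [pvCommaSplit, h, hh]

theorem pv_charA (line : String) (t₁ t₂ u v w x : List Char)
    (hs : (PySem.Str.strip line).toList = t₁ ++ '[' :: (t₂ ++ ']' :: (u ++ '{' :: v)))
    (hwx : u ++ '{' :: v = w ++ '}' :: x)
    (n1 : '[' ∉ t₁) (n2 : ']' ∉ t₂) (nu : '{' ∉ u) (nw : '}' ∉ w) :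
    parse_table_header_py line =
      (String.ofList (PySem.Chars.strip t₁),
        (pvCommaSplit (((u ++ '{' :: v).drop (u.length + 1)).take
          (w.length - (u.length + 1)))).filterMap pvKeepField) := by
  simp only [parse_table_header_py]
  have h1 : PySem.Str.splitMax? (PySem.Str.strip line) "[" 1 =
      some [String.ofList t₁, String.ofList (t₂ ++ ']' :: (u ++ '{' :: v))] := by
    unfold PySem.Str.splitMax? PySem.Chars.splitMax?
    rw [hs]
    rw [if_neg (by simp)]
    rw [show ("[" : String).toList = ['['] from rfl]
    rw [pv_splitOnMax_first '[' t₁ _ n1]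
    rfl
  rw [h1]
  simp only
  have h2 : PySem.Str.splitMax? (String.ofList (t₂ ++ ']' :: (u ++ '{' :: v))) "]" 1 =
      some [String.ofList t₂, String.ofList (u ++ '{' :: v)] := by
    unfold PySem.Str.splitMax? PySem.Chars.splitMax?
    rw [show (String.ofList (t₂ ++ ']' :: (u ++ '{' :: v))).toList = t₂ ++ ']' :: (u ++ '{' :: v) by simp]
    rw [if_neg (by simp)]
    rw [show ("]" : String).toList = [']'] from rfl]
    rw [pv_splitOnMax_first ']' t₂ _ n2]
    rfl
  rw [h2]
  simp only
  have hfo : PySem.Str.find (String.ofList (u ++ '{' :: v)) "{" = ((u.length : ℕ) : ℤ) := by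
    unfold PySem.Str.find PySem.Chars.find
    rw [show (String.ofList (u ++ '{' :: v)).toList = u ++ '{' :: v by simp]
    rw [show ("{" : String).toList = ['{'] from rfl]
    rw [pv_findGo, pv_first_append '{' u v 0 nu]
    simp
  have hfc : PySem.Str.find (String.ofList (u ++ '{' :: v)) "}" = ((w.length : ℕ) : ℤ) := by
    unfold PySem.Str.find PySem.Chars.find
    rw [show (String.ofList (u ++ '{' :: v)).toList = u ++ '{' :: v by simp]
    rw [show ("}" : String).toList = ['}'] from rfl]
    rw [hwx, pv_findGo, pv_first_append '}' w x 0 nw]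
    simp
  rw [hfo, hfc]
  have hslice : PySem.Str.slice (String.ofList (u ++ '{' :: v))
      (some (((u.length : ℕ) : ℤ) + 1)) (some ((w.length : ℕ) : ℤ)) =
      String.ofList (((u ++ '{' :: v).drop (u.length + 1)).take (w.length - (u.length + 1))) := by
    unfold PySem.Str.slice
    rw [show (String.ofList (u ++ '{' :: v)).toList = u ++ '{' :: v by simp]
    congr 1
    rw [show ((u.length : ℕ) : ℤ) + 1 = (((u.length + 1 : ℕ)) : ℤ) by push_cast; ring]
    rw [PySem.Chars.slice_eq_listSlice, PySem.List.slice_natCast]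
  rw [hslice]
  set seg := ((u ++ '{' :: v).drop (u.length + 1)).take (w.length - (u.length + 1)) with hseg
  have hsplit : PySem.Str.split? (String.ofList seg) "," = some (List.map String.ofList (pvCommaSplit seg)) := by
    unfold PySem.Str.split? PySem.Chars.split?
    rw [show (String.ofList seg).toList = seg by simp]
    rw [if_neg (by simp)]
    rw [show ("," : String).toList = [','] from rfl]
    rw [pv_splitOn_comma]
    simp
  rw [hsplit]
  simp only [Option.getD_some]
  have hname : PySem.Str.strip (String.ofList t₁) = String.ofList (PySem.Chars.strip t₁) := by
    unfold PySem.Str.strip; rw [show (String.ofList t₁).toList = t₁ by simp]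
  have hfun : ((fun f => if PySem.Str.strip f ≠ "" then some (PySem.Str.strip f) else none) ∘
      String.ofList) = pvKeepField := by
    funext p
    simp only [Function.comp_apply, pvKeepField]
    rw [show PySem.Str.strip (String.ofList p) = String.ofList (PySem.Chars.strip p) by
      unfold PySem.Str.strip; rw [show (String.ofList p).toList = p by simp]]
    by_cases h : PySem.Chars.strip p = []
    · simp [h]
    · simp [h]
  rw [hname, List.filterMap_map, hfun]

theorem pv_scan_step_lb (r : List Char) (k : ℕ) (rb ob cb : ℤ) :
    pvScanB ('[' :: r) k (-1, rb, ob, cb) = pvScanB r (k + 1) ((k : ℤ), rb, ob, cb) := by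
  simp [pvScanB]

theorem pv_scan_step_rb (r : List Char) (k : ℕ) (lb ob cb : ℤ) (h : 0 ≤ lb) :
    pvScanB (']' :: r) k (lb, -1, ob, cb) = pvScanB r (k + 1) (lb, (k : ℤ), ob, cb) := by
  simp only [pvScanB, if_neg (by omega : ¬ lb < 0), if_pos (by norm_num : (-1:ℤ) < 0)]
  simp

theorem pv_charB (line : String) (t₁ t₂ u v w x : List Char)
    (hs : (PySem.Str.strip line).toList = t₁ ++ '[' :: (t₂ ++ ']' :: (u ++ '{' :: v)))
    (hwx : u ++ '{' :: v = w ++ '}' :: x)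
    (n1 : '[' ∉ t₁) (n2 : ']' ∉ t₂) (nu : '{' ∉ u) (nw : '}' ∉ w) :
    parse_table_header_py_alt line =
      (String.ofList (PySem.Chars.strip t₁),
        (pvCommaSplit (((u ++ '{' :: v).drop (u.length + 1)).take
          (w.length - (u.length + 1)))).filterMap pvKeepField) := by
  have hscan : pvScanB ((PySem.Str.strip line).toList) 0 (-1, -1, -1, -1) =
      (((t₁.length : ℕ) : ℤ), ((t₁.length + 1 + t₂.length : ℕ) : ℤ),
       ((t₁.length + 1 + t₂.length + 1 + u.length : ℕ) : ℤ),
       ((t₁.length + 1 + t₂.length + 1 + w.length : ℕ) : ℤ)) := by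
    rw [hs, pv_scan1 t₁ _ 0 _ _ _ n1, pv_scan_step_lb, pv_scan2 t₂ _ _ _ _ _ n2 (by positivity),
      pv_scan_step_rb _ _ _ _ _ (by positivity),
      pv_scan3 _ _ _ _ _ _ (by positivity) (by positivity) (fun _ => rfl) (fun _ => rfl)]
    rw [if_pos (by norm_num), if_pos (by norm_num)]
    rw [pv_first_append '{' u v _ nu, hwx, pv_first_append '}' w x _ nw]
    simp only [Prod.mk.injEq]
    push_cast
    omega
  simp only [parse_table_header_py_alt]
  rw [hscan]
  rw [if_neg (by push_cast; omega)]
  have hname : PySem.List.slice ((PySem.Str.strip line).toList) none (some ((t₁.length : ℕ) : ℤ)) = t₁ := by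
    rw [PySem.List.slice_to_natCast, hs, List.take_left]
  have hseg : PySem.List.slice ((PySem.Str.strip line).toList)
      (some (((t₁.length + 1 + t₂.length + 1 + u.length : ℕ) : ℤ) + 1))
      (some ((t₁.length + 1 + t₂.length + 1 + w.length : ℕ) : ℤ)) =
      ((u ++ '{' :: v).drop (u.length + 1)).take (w.length - (u.length + 1)) := by
    rw [show ((((t₁.length + 1 + t₂.length + 1 + u.length : ℕ) : ℤ)) + 1 =
      ((t₁.length + 1 + t₂.length + 1 + u.length + 1 : ℕ) : ℤ)) by push_cast; ring]
    rw [PySem.List.slice_natCast, hs]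
    have hpre : t₁ ++ '[' :: (t₂ ++ ']' :: (u ++ '{' :: v)) =
        (t₁ ++ '[' :: t₂ ++ [']']) ++ (u ++ '{' :: v) := by simp
    rw [hpre]
    have hlen : (t₁ ++ '[' :: t₂ ++ [']']).length = t₁.length + 1 + t₂.length + 1 := by
      simp; omega
    rw [show t₁.length + 1 + t₂.length + 1 + u.length + 1 =
      (t₁ ++ '[' :: t₂ ++ [']']).length + (u.length + 1) by omega]
    rw [List.drop_append, List.drop_eq_nil_of_le (by omega), List.nil_append]
    rw [show ((t₁ ++ '[' :: t₂ ++ [']']).length + (u.length + 1) - (t₁ ++ '[' :: t₂ ++ [']']).length)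
      = u.length + 1 by omega]
    rw [show (t₁.length + 1 + t₂.length + 1 + w.length -
      ((t₁ ++ '[' :: t₂ ++ [']']).length + (u.length + 1))) = w.length - (u.length + 1) by omega]
  rw [hname, hseg]
  rw [pv_fieldsB_eq]
  obtain ⟨h0, t0, hh⟩ := List.exists_cons_of_ne_nil
    (pvCommaSplit_ne_nil (((u ++ '{' :: v).drop (u.length + 1)).take (w.length - (u.length + 1))))
  rw [hh]
  simp

-- ===== VERDICT (by name: the statement is the Claim_ definition above) =====
theorem parse_table_header_py_spec : Claim_equal_parse_table_header_py := by
  intro line _ hpre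
  unfold Spec_parse_table_header_py
  obtain ⟨h1, h2, h3, h4⟩ := hpre
  obtain ⟨t₁, r₁, e1, n1, d1⟩ := pv_mem_split_first h1
  rw [d1] at h2 h3 h4
  obtain ⟨t₂, r₂, e2, n2, d2⟩ := pv_mem_split_first h2
  rw [d2] at h3 h4
  obtain ⟨u, v, eu, nu, -⟩ := pv_mem_split_first h3
  obtain ⟨w, x, ew, nw, -⟩ := pv_mem_split_first h4
  have hs : (PySem.Str.strip line).toList = t₁ ++ '[' :: (t₂ ++ ']' :: (u ++ '{' :: v)) := by
    rw [e1, e2, ← eu]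
  have hwx : u ++ '{' :: v = w ++ '}' :: x := by rw [← eu, ew]
  rw [pv_charA line t₁ t₂ u v w x hs hwx n1 n2 nu nw,
    pv_charB line t₁ t₂ u v w x hs hwx n1 n2 nu nw]
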